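-- pv_equiv track=rewrite | github.com/seokcode/Python_Codingtest | By-Python/programmers/[위클리챌린지]/입실퇴실.py | solution
-- ===== SOURCE A (Python) =====
-- def solution(enter, leave):
--     answer = [0] * len(enter)
--     room = []
--     enterHead = 0
--     leaveHead = 0
--
--     while enterHead < len(enter) and leaveHead < len(leave):
--         room.append(enter[enterHead])
--         enterHead += 1
--
--         while leaveHead < len(leave) and leave[leaveHead] in room:
--             room.remove(leave[leaveHead]) # 퇴장
--             answer[leave[leaveHead]-1] += len(room) # 퇴장한 사람이 퇴장 전에 같이 있던(만난) 인원 수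
--             leaveHead += 1
--
--             # 퇴장 이후 남은 사람들도 퇴장한 사람 만났었던거니까 +1
--             for r in room:
--                 answer[r-1] += 1
--
--     return answer
-- ===== SOURCE B (Python) =====
-- def solution(enter, leave):
--     n = len(enter)
--     answer = [0] * n
--     count = {}      # multiset of people currently in the room
--     starts = []     # entry offset (leaves processed so far) of each consumed enter, in order
--     inroom = 0      # current room size
--     L = 0           # number of leave events processed (lazy global offset)
--     li = 0          # next leave to process
--     for e in enter:
--         if li >= len(leave):
--             break
--         count[e] = count.get(e, 0) + 1
--         starts.append(L)
--         inroom += 1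
--         while li < len(leave) and count.get(leave[li], 0) > 0:
--             v = leave[li]
--             count[v] -= 1
--             inroom -= 1
--             answer[v - 1] += L + inroom   # room size after this leave, plus lazy offset
--             L += 1
--             li += 1
--     # settle the lazy offsets: each consumed enter gains the leaves seen while relevant,
--     # each processed leave gives the tail back
--     for e, L0 in zip(enter, starts):
--         if L0 != L:
--             answer[e - 1] += L - L0
--     for v in leave[:li]:
--         answer[v - 1] -= L
--     return answer
-- ===== Notes on version B (the rewrite author's own statement) =====
-- stated objective: faster
-- what changed: B replaces A's list room (linear 'in'/remove and a per-leave '+1 to every person still in the room' inner loop) by a multiset counter for membership plus a lazy global leave-counter offset (per-enter entry offsets recorded in a side list and settled once at the end), removing the O(n) work per leave.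
-- outside the precondition, e.g. on solution([2, 5], [2, 3]): A returns [0, 0], B returns [0, 0]
import Mathlib
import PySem

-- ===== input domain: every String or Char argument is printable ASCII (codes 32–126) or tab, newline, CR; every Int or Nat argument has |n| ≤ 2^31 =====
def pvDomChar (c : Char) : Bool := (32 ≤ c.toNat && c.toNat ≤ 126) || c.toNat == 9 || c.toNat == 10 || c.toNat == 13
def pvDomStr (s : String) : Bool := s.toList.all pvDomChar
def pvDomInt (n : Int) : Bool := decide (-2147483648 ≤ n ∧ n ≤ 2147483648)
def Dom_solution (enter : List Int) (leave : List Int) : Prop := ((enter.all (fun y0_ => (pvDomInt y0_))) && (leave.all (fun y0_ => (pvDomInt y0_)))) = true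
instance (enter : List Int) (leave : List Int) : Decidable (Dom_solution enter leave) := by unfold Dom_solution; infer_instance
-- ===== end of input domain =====

-- B replaces A's O(n) work per leave (list membership/remove + '+1 to everyone left in the room')
-- by a multiset counter and a lazy global leave-counter offset; measured asymptotically faster.

-- ===== PORT A =====
-- answer[v-1] += d  (Python indexing: negative wraps, out of range raises — the raising inputs are excluded by Pre_)
def pyAdd (a : List Int) (v d : Int) : List Int :=
  PySem.List.pySetD a (v - 1) (PySem.List.pyGetD a (v - 1) 0 + d)

-- inner 'while leaveHead < len(leave) and leave[leaveHead] in room' loop; returns (answer, room, remaining leaves)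
def innerA (ans room leaves : List Int) : List Int × List Int × List Int :=
  match leaves with
  | [] => (ans, room, [])
  | v :: rest =>
    if room.contains v then
      let room' := room.erase v                                   -- room.remove(leave[leaveHead]): first occurrence
      let ans' := pyAdd ans v (room'.length : Int)                -- answer[...] += len(room)
      let ans'' := room'.foldl (fun x r => pyAdd x r 1) ans'      -- for r in room: answer[r-1] += 1
      innerA ans'' room' rest
    else (ans, room, v :: rest)

-- outer 'while enterHead < len(enter) and leaveHead < len(leave)' loop; returns (answer, room, enters left, leaves left)
def outerA (ans room enters leaves : List Int) : List Int × List Int × List Int × List Int :=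
  match enters, leaves with
  | [], ls => (ans, room, [], ls)
  | e :: es, [] => (ans, room, e :: es, [])
  | e :: es, l :: ls =>
    let s := innerA ans (room ++ [e]) (l :: ls)
    outerA s.1 s.2.1 es s.2.2

def solution (enter : List Int) (leave : List Int) : List Int :=
  (outerA (List.replicate enter.length 0) [] enter leave).1

-- ===== PORT B =====
-- inner while loop of B: counter-based membership, lazy offset L; returns (answer, count, inroom, L, leaves left)
def innerB (ans : List Int) (cnt : PySem.Dict Int Int) (inroom L : Int) (leaves : List Int) :
    List Int × PySem.Dict Int Int × Int × Int × List Int :=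
  match leaves with
  | [] => (ans, cnt, inroom, L, [])
  | v :: rest =>
    if cnt.getD v 0 > 0 then
      let cnt' := cnt.insert v (cnt.getD v 0 - 1)
      let inroom' := inroom - 1
      let ans' := pyAdd ans v (L + inroom')    -- answer[v-1] += L + inroom
      innerB ans' cnt' inroom' (L + 1) rest
    else (ans, cnt, inroom, L, v :: rest)

-- B's for-loop over enter with break; returns (answer, count, starts, inroom, L, enters left, leaves left)
def outerB (ans : List Int) (cnt : PySem.Dict Int Int) (starts : List Int) (inroom L : Int)
    (enters leaves : List Int) :
    List Int × PySem.Dict Int Int × List Int × Int × Int × List Int × List Int :=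
  match enters, leaves with
  | [], ls => (ans, cnt, starts, inroom, L, [], ls)
  | e :: es, [] => (ans, cnt, starts, inroom, L, e :: es, [])    -- 'if li >= len(leave): break'
  | e :: es, l :: ls =>
    let cnt1 := cnt.insert e (cnt.getD e 0 + 1)                  -- count[e] = count.get(e,0)+1
    let starts1 := starts ++ [L]                                 -- starts.append(L)
    let s := innerB ans cnt1 (inroom + 1) L (l :: ls)
    outerB s.1 s.2.1 starts1 s.2.2.1 s.2.2.2.1 es s.2.2.2.2

def solution_alt (enter : List Int) (leave : List Int) : List Int :=
  let s := outerB (List.replicate enter.length 0) PySem.Dict.empty [] 0 0 enter leave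
  let L := s.2.2.2.2.1
  let li := leave.length - s.2.2.2.2.2.2.length                  -- number of processed leaves
  -- for e, L0 in zip(enter, starts): if L0 != L: answer[e-1] += L - L0
  let ans1 := (List.zip enter s.2.2.1).foldl
    (fun x p => if p.2 ≠ L then pyAdd x p.1 (L - p.2) else x) s.1
  -- for v in leave[:li]: answer[v-1] -= L
  (leave.take li).foldl (fun x v => pyAdd x v (-L)) ans1

-- ===== PRECONDITION & SPEC =====
-- Pre_ is a decidable sufficient condition that A performs no out-of-range index access (all
-- room/leave accesses go through values of enter): either every enter value lies inside Python's
-- index range [1-n, n] of the answer list, or the first leave never matches anyone (so no leave is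
-- ever processed and no index is touched).  Outside Pre_ A may raise IndexError; on the excluded
-- inputs where A still returns (an out-of-range person never involved in a processed leave), B
-- returns the same value.
def Pre_solution (enter : List Int) (leave : List Int) : Prop :=
  (∀ v ∈ enter, 1 - (enter.length : Int) ≤ v ∧ v ≤ (enter.length : Int)) ∨
    (∀ x ∈ leave.head?, x ∉ enter)
instance (enter : List Int) (leave : List Int) : Decidable (Pre_solution enter leave) := by unfold Pre_solution; infer_instance

def pvWitness_solution : List Int × List Int := ([1, 2], [2, 1])

def Spec_solution (enter : List Int) (leave : List Int) (out : List Int) : Prop := out = solution_alt enter leave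
instance (enter : List Int) (leave : List Int) (out : List Int) : Decidable (Spec_solution enter leave out) := by unfold Spec_solution; infer_instance

-- ===== CLAIM (what is proved, stated in full; the proofs are below) =====
def Claim_equal_solution : Prop := ∀ (enter : List Int) (leave : List Int), Dom_solution enter leave → Pre_solution enter leave → Spec_solution enter leave (solution enter leave)

-- ===== LEMMAS AND PROOFS =====

-- pointwise algebra of pyAdd (the resolved index depends only on the length, which pyAdd preserves)
theorem pyIdx?_lt {n : Nat} {i : Int} {k : Nat} (h : PySem.List.pyIdx? n i = some k) : k < n := by
  simp only [PySem.List.pyIdx?] at h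
  split_ifs at h <;> simp at h <;> omega

theorem pyAdd_eq (a : List Int) (v d : Int) :
    pyAdd a v d = match PySem.List.pyIdx? a.length (v - 1) with
      | some k => a.set k ((a[k]?.getD 0) + d)
      | none => a := by
  simp [pyAdd, PySem.List.pySetD, PySem.List.pySet?, PySem.List.pyGetD, PySem.List.pyGet?]
  cases PySem.List.pyIdx? a.length (v - 1) <;> simp

theorem pyAdd_zero (a : List Int) (v : Int) : pyAdd a v 0 = a := by
  rw [pyAdd_eq]
  cases h : PySem.List.pyIdx? a.length (v - 1) with
  | none => rfl
  | some k =>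
    have hk := pyIdx?_lt h
    simp [List.getElem?_eq_getElem hk, List.set_getElem_self]

theorem pyAdd_same (a : List Int) (v d e : Int) :
    pyAdd (pyAdd a v d) v e = pyAdd a v (d + e) := by
  rw [pyAdd_eq a v d, pyAdd_eq]
  cases h : PySem.List.pyIdx? a.length (v - 1) with
  | none => rw [pyAdd_eq, h]
  | some k =>
    have hk := pyIdx?_lt h
    rw [pyAdd_eq]
    simp only [List.length_set, h]
    rw [List.getElem?_set_self hk, List.set_set]
    simp [List.getElem?_eq_getElem hk]
    congr 1
    ring

theorem pyAdd_comm (a : List Int) (v d w e : Int) :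
    pyAdd (pyAdd a v d) w e = pyAdd (pyAdd a w e) v d := by
  by_cases hvw : v = w
  · subst hvw; rw [pyAdd_same, pyAdd_same, Int.add_comm]
  · rw [pyAdd_eq a v d, pyAdd_eq a w e]
    cases hv : PySem.List.pyIdx? a.length (v - 1) with
    | none =>
      cases hw : PySem.List.pyIdx? a.length (w - 1) with
      | none => rw [pyAdd_eq, pyAdd_eq]; simp [hv, hw]
      | some k =>
        rw [pyAdd_eq, pyAdd_eq]
        simp only [List.length_set, hv, hw]
    | some j =>
      have hj := pyIdx?_lt hv
      cases hw : PySem.List.pyIdx? a.length (w - 1) with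
      | none =>
        rw [pyAdd_eq, pyAdd_eq]
        simp only [List.length_set, hv, hw]
      | some k =>
        have hk := pyIdx?_lt hw
        rw [pyAdd_eq, pyAdd_eq]
        simp only [List.length_set, hv, hw]
        by_cases hjk : j = k
        · subst hjk
          rw [List.getElem?_set_self hj, List.getElem?_set_self hj, List.set_set, List.set_set]
          simp [List.getElem?_eq_getElem hj]
          congr 1
          ring
        · rw [List.getElem?_set_ne (by omega), List.getElem?_set_ne (by omega),
              List.set_comm _ _ (by omega)]

-- the '+delta to every r in xs' accumulation
def roomFold (xs : List Int) (L : Int) (a : List Int) : List Int :=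
  xs.foldl (fun x r => pyAdd x r L) a

theorem roomFold_nil (L : Int) (a : List Int) : roomFold [] L a = a := rfl

theorem roomFold_cons (x : Int) (xs : List Int) (L : Int) (a : List Int) :
    roomFold (x :: xs) L a = roomFold xs L (pyAdd a x L) := rfl

theorem roomFold_append (xs ys : List Int) (L : Int) (a : List Int) :
    roomFold (xs ++ ys) L a = roomFold ys L (roomFold xs L a) := by
  simp [roomFold, List.foldl_append]

theorem pyAdd_roomFold (xs : List Int) (L : Int) (a : List Int) (v d : Int) :
    roomFold xs L (pyAdd a v d) = pyAdd (roomFold xs L a) v d := by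
  induction xs generalizing a with
  | nil => rfl
  | cons x t ih => rw [roomFold_cons, roomFold_cons, pyAdd_comm, ih]

theorem roomFold_perm {xs ys : List Int} (h : xs.Perm ys) (L : Int) (a : List Int) :
    roomFold xs L a = roomFold ys L a := by
  induction h generalizing a with
  | nil => rfl
  | cons x _ ih => rw [roomFold_cons, roomFold_cons, ih]
  | swap x y l => rw [roomFold_cons, roomFold_cons, roomFold_cons, roomFold_cons, pyAdd_comm]
  | trans _ _ ih1 ih2 => rw [ih1, ih2]

theorem roomFold_roomFold (xs : List Int) (p q : Int) (a : List Int) :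
    roomFold xs p (roomFold xs q a) = roomFold xs (p + q) a := by
  induction xs generalizing a with
  | nil => rfl
  | cons x t ih => rw [roomFold_cons, roomFold_cons, roomFold_cons, ← pyAdd_roomFold,
      pyAdd_same, ih, Int.add_comm q p]

theorem roomFold_zero (xs : List Int) (a : List Int) : roomFold xs 0 a = a := by
  induction xs generalizing a with
  | nil => rfl
  | cons x t ih => rw [roomFold_cons, pyAdd_zero]; exact ih a

theorem roomFold_cancel (xs : List Int) (L : Int) (a : List Int) :
    roomFold xs (-L) (roomFold xs L a) = a := by
  rw [roomFold_roomFold]; simp [roomFold_zero]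

-- settling a list of (person, entry-offset) debts
def debtFold (ps : List (Int × Int)) (a : List Int) : List Int :=
  ps.foldl (fun x p => pyAdd x p.1 (-p.2)) a

theorem pyAdd_debtFold (ps : List (Int × Int)) (a : List Int) (v d : Int) :
    debtFold ps (pyAdd a v d) = pyAdd (debtFold ps a) v d := by
  induction ps generalizing a with
  | nil => rfl
  | cons p t ih => simp only [debtFold, List.foldl_cons] at ih ⊢; rw [pyAdd_comm, ih]

theorem debtFold_append_singleton (ps : List (Int × Int)) (e L : Int) (a : List Int) :
    debtFold (ps ++ [(e, L)]) a = pyAdd (debtFold ps a) e (-L) := by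
  simp [debtFold, List.foldl_append]

-- the end-of-run settling loop of B equals '+L to every consumed person' after paying all debts
theorem settle_eq (L : Int) (ps : List (Int × Int)) (a : List Int) :
    ps.foldl (fun x p => if p.2 ≠ L then pyAdd x p.1 (L - p.2) else x) a =
      roomFold (ps.map Prod.fst) L (debtFold ps a) := by
  induction ps generalizing a with
  | nil => rfl
  | cons p t ih =>
    simp only [List.foldl_cons, List.map_cons, roomFold_cons]
    rw [ih]
    congr 1
    have hdt : debtFold (p :: t) a = debtFold t (pyAdd a p.1 (-p.2)) := rfl
    rw [hdt, pyAdd_debtFold, pyAdd_same]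
    split_ifs with h
    · rw [pyAdd_debtFold]
      congr 1
      ring
    · simp at h
      rw [h]
      simp [pyAdd_zero]

-- zip recovers the consumed pairs when the first components are a prefix
theorem zip_map_fst_snd (ps : List (Int × Int)) (rest : List Int) :
    List.zip (ps.map Prod.fst ++ rest) (ps.map Prod.snd) = ps := by
  induction ps with
  | nil => simp
  | cons p t ih => simp [ih]

-- the simulation invariant between A's room list and B's counter/debts/offset state
def SimInv (room ansA ansB : List Int) (pairs : List (Int × Int)) (cnt : PySem.Dict Int Int)
    (inroom L : Int) : Prop :=
  (∀ v, cnt.getD v 0 = (room.count v : Int)) ∧ inroom = (room.length : Int) ∧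
    ansA = roomFold room L (debtFold pairs ansB)

theorem inner_sim (leaves : List Int) :
    ∀ (ansA room ansB : List Int) (pairs : List (Int × Int)) (cnt : PySem.Dict Int Int)
      (inroom L : Int),
    SimInv room ansA ansB pairs cnt inroom L →
    ∃ done : List Int,
      leaves = done ++ (innerA ansA room leaves).2.2 ∧
      (innerB ansB cnt inroom L leaves).2.2.2.2 = (innerA ansA room leaves).2.2 ∧
      room.Perm ((innerA ansA room leaves).2.1 ++ done) ∧
      (innerB ansB cnt inroom L leaves).2.2.2.1 = L + done.length ∧
      SimInv (innerA ansA room leaves).2.1 (innerA ansA room leaves).1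
          (innerB ansB cnt inroom L leaves).1 pairs (innerB ansB cnt inroom L leaves).2.1
          (innerB ansB cnt inroom L leaves).2.2.1 (innerB ansB cnt inroom L leaves).2.2.2.1 := by
  induction leaves with
  | nil =>
    intro ansA room ansB pairs cnt inroom L hInv
    exact ⟨[], by simp [innerA], by simp [innerA, innerB], by simp [innerA],
      by simp [innerB], by simpa [innerA, innerB] using hInv⟩
  | cons v rest ih =>
    intro ansA room ansB pairs cnt inroom L hInv
    obtain ⟨hcnt, hroom, hans⟩ := hInv
    by_cases hmem : v ∈ room
    · -- both loops take the step
      have hcontains : room.contains v = true := List.contains_iff_mem.mpr hmem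
      have hcount : 0 < room.count v := List.count_pos_iff.mpr hmem
      have hcond : cnt.getD v 0 > 0 := by rw [hcnt]; exact_mod_cast hcount
      have hperm : room.Perm (v :: room.erase v) := List.perm_cons_erase hmem
      have hlen : (room.erase v).length + 1 = room.length := by
        have := hperm.length_eq; simpa using this.symm
      -- the invariant after one removal step
      have hInv' : SimInv (room.erase v)
          (roomFold (room.erase v) 1 (pyAdd ansA v ((room.erase v).length : Int)))
          (pyAdd ansB v (L + (inroom - 1))) pairs (cnt.insert v (cnt.getD v 0 - 1))
          (inroom - 1) (L + 1) := by
        -- count decreases at v, length drops by one, the lazy offset grows by one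
        refine ⟨?_, by omega, ?_⟩
        · intro w
          rw [PySem.Dict.getD_insert]
          by_cases hw : w = v
          · subst hw
            rw [if_pos rfl, hcnt, List.count_erase_self]
            omega
          · rw [if_neg hw, hcnt, List.count_erase_of_ne hw]
        · rw [hans, roomFold_perm hperm, roomFold_cons]
          simp only [pyAdd_roomFold, pyAdd_debtFold]
          rw [pyAdd_same, roomFold_roomFold, Int.add_comm 1 L]
          congr 1
          omega
      obtain ⟨done', h1, h2, h3, h4, h5⟩ :=
        ih _ (room.erase v) _ pairs (cnt.insert v (cnt.getD v 0 - 1)) (inroom - 1) (L + 1) hInv'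
      refine ⟨v :: done', ?_, ?_, ?_, ?_, ?_⟩
      · simp only [innerA, hcontains, if_true]
        simpa using h1
      · simp only [innerA, innerB, hcontains, if_true, hcond, gt_iff_lt, if_pos]
        exact h2
      · simp only [innerA, hcontains, if_true]
        exact hperm.trans ((h3.cons v).trans List.perm_middle.symm)
      · simp only [innerA, innerB, hcontains, if_true, hcond, gt_iff_lt, if_pos]
        rw [h4]; push_cast [List.length_cons]; ring
      · simp only [innerA, innerB, hcontains, if_true, hcond, gt_iff_lt, if_pos]
        exact h5
    · -- neither loop takes the step
      have hcontains : room.contains v = false := by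
        simp [List.contains_iff_mem, hmem]
      have hcount : room.count v = 0 := List.count_eq_zero.mpr hmem
      have hcond : ¬ cnt.getD v 0 > 0 := by rw [hcnt, hcount]; simp
      refine ⟨[], ?_, ?_, ?_, ?_, ?_⟩ <;>
        simp [innerA, innerB, hmem, SimInv, hcnt, hroom, hans]

theorem outer_sim (enters : List Int) :
    ∀ (leaves ansA room ansB starts : List Int) (pairs : List (Int × Int))
      (cnt : PySem.Dict Int Int) (inroom L : Int),
    SimInv room ansA ansB pairs cnt inroom L →
    ∃ (doneE doneL : List Int) (pairsNew : List (Int × Int)),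
      enters = doneE ++ (outerA ansA room enters leaves).2.2.1 ∧
      leaves = doneL ++ (outerA ansA room enters leaves).2.2.2 ∧
      (outerB ansB cnt starts inroom L enters leaves).2.2.2.2.2.1 = (outerA ansA room enters leaves).2.2.1 ∧
      (outerB ansB cnt starts inroom L enters leaves).2.2.2.2.2.2 = (outerA ansA room enters leaves).2.2.2 ∧
      pairsNew.map Prod.fst = doneE ∧
      (outerB ansB cnt starts inroom L enters leaves).2.2.1 = starts ++ pairsNew.map Prod.snd ∧
      (room ++ doneE).Perm ((outerA ansA room enters leaves).2.1 ++ doneL) ∧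
      (outerB ansB cnt starts inroom L enters leaves).2.2.2.2.1 = L + doneL.length ∧
      (outerA ansA room enters leaves).1 =
        roomFold (outerA ansA room enters leaves).2.1
          (outerB ansB cnt starts inroom L enters leaves).2.2.2.2.1
          (debtFold (pairs ++ pairsNew) (outerB ansB cnt starts inroom L enters leaves).1) := by
  induction enters with
  | nil =>
    intro leaves ansA room ansB starts pairs cnt inroom L hInv
    exact ⟨[], [], [], by simp [outerA], by simp [outerA], by simp [outerA, outerB],
      by simp [outerA, outerB], rfl, by simp [outerB], by simp [outerA], by simp [outerB],
      by simpa [outerA, outerB] using hInv.2.2⟩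
  | cons e es ih =>
    intro leaves ansA room ansB starts pairs cnt inroom L hInv
    obtain ⟨hcnt, hroom, hans⟩ := hInv
    match leaves with
    | [] =>
      exact ⟨[], [], [], by simp [outerA], by simp [outerA], by simp [outerA, outerB],
        by simp [outerA, outerB], rfl, by simp [outerB], by simp [outerA], by simp [outerB],
        by simpa [outerA, outerB] using hans⟩
    | l :: ls =>
      -- the enter step preserves the invariant (the new debt (e, L) cancels the new +L in the room)
      have hInvE : SimInv (room ++ [e]) ansA ansB (pairs ++ [(e, L)])
          (cnt.insert e (cnt.getD e 0 + 1)) (inroom + 1) L := by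
        refine ⟨?_, by simp; omega, ?_⟩
        · intro w
          rw [PySem.Dict.getD_insert]
          by_cases hw : w = e
          · subst hw; rw [if_pos rfl, hcnt]; simp [List.count_append]
          · rw [if_neg hw, hcnt]; simp [List.count_append, Ne.symm hw]
        · rw [roomFold_append, roomFold_cons, roomFold_nil, debtFold_append_singleton,
              pyAdd_roomFold, pyAdd_same]
          simp [pyAdd_zero, hans]
      obtain ⟨done, hi1, hi2, hi3, hi4, hi5⟩ :=
        inner_sim (l :: ls) ansA (room ++ [e]) ansB (pairs ++ [(e, L)])
          (cnt.insert e (cnt.getD e 0 + 1)) (inroom + 1) L hInvE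
      obtain ⟨doneE', doneL', pairsNew', ho1, ho2, ho3, ho4, ho5, ho6, ho7, ho8, ho9⟩ :=
        ih (innerA ansA (room ++ [e]) (l :: ls)).2.2
          (innerA ansA (room ++ [e]) (l :: ls)).1
          (innerA ansA (room ++ [e]) (l :: ls)).2.1
          (innerB ansB (cnt.insert e (cnt.getD e 0 + 1)) (inroom + 1) L (l :: ls)).1
          (starts ++ [L]) (pairs ++ [(e, L)])
          (innerB ansB (cnt.insert e (cnt.getD e 0 + 1)) (inroom + 1) L (l :: ls)).2.1
          (innerB ansB (cnt.insert e (cnt.getD e 0 + 1)) (inroom + 1) L (l :: ls)).2.2.1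
          (innerB ansB (cnt.insert e (cnt.getD e 0 + 1)) (inroom + 1) L (l :: ls)).2.2.2.1
          hi5
      refine ⟨e :: doneE', done ++ doneL', (e, L) :: pairsNew', ?_, ?_, ?_, ?_, ?_, ?_, ?_, ?_, ?_⟩
      · simp only [outerA]
        simpa using ho1
      · simp only [outerA]
        conv_lhs => rw [hi1]
        conv_lhs => rw [ho2]
        exact (List.append_assoc done doneL' _).symm
      · simp only [outerA, outerB]
        rw [hi2]
        exact ho3
      · simp only [outerA, outerB]
        rw [hi2]
        exact ho4
      · simp [ho5]
      · simp only [outerA, outerB]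
        rw [hi2, ho6]
        simp
      · simp only [outerA]
        rw [List.perm_iff_count]
        intro x
        have c1 := hi3.count_eq x
        have c2 := ho7.count_eq x
        simp [List.count_append, List.count_cons] at c1 c2 ⊢
        split_ifs at c1 c2 ⊢ <;> omega
      · simp only [outerB]
        rw [hi2, ho8, hi4]
        push_cast [List.length_append]
        ring
      · simp only [outerA, outerB]
        rw [hi2]
        rw [show pairs ++ (e, L) :: pairsNew' = (pairs ++ [(e, L)]) ++ pairsNew' by simp]
        exact ho9

-- ===== VERDICT (by name: the statement is the Claim_ definition above) =====
theorem solution_spec : Claim_equal_solution := by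
  unfold Claim_equal_solution
  intro enter leave _hDom _hPre
  unfold Spec_solution solution solution_alt
  dsimp only
  have h0 : SimInv [] (List.replicate enter.length 0) (List.replicate enter.length 0) []
      PySem.Dict.empty 0 0 :=
    ⟨by simp [PySem.Dict.getD_empty], rfl, rfl⟩
  obtain ⟨doneE, doneL, pairsNew, h1, h2, h3, h4, h5, h6, h7, h8, h9⟩ :=
    outer_sim enter leave (List.replicate enter.length 0) []
      (List.replicate enter.length 0) [] [] PySem.Dict.empty 0 0 h0
  simp only [List.nil_append] at h6 h7 h9
  have hL : leave.length -
      (outerB (List.replicate enter.length 0) PySem.Dict.empty [] 0 0 enter leave).2.2.2.2.2.2.length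
      = doneL.length := by
    have hl := congrArg List.length h2
    simp [List.length_append] at hl
    rw [h4]
    omega
  have htL : List.take (leave.length -
      (outerB (List.replicate enter.length 0) PySem.Dict.empty [] 0 0 enter leave).2.2.2.2.2.2.length)
      leave = doneL := by
    rw [hL]
    conv_lhs => rw [h2]
    exact List.take_left
  have hzip : List.zip enter
      (outerB (List.replicate enter.length 0) PySem.Dict.empty [] 0 0 enter leave).2.2.1
      = pairsNew := by
    rw [h6]
    conv_lhs => rw [h1, ← h5]
    exact zip_map_fst_snd pairsNew _
  rw [htL, hzip, settle_eq, h5]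
  show _ = roomFold doneL _ (roomFold doneE _ _)
  rw [roomFold_perm h7, roomFold_append, roomFold_cancel, h9]
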